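-- pv_equiv track=rewrite | github.com/jar-ben/mustool | group.py | tseitinOnCnf
-- ===== SOURCE A (Python) =====
-- def tseitinClause(clause, current):
--     current += 1
--     res = []
--     for l in clause:
--         res.append([current,-l])
--     res.append([-current] + [l for l in clause])
--     return res, current
--
-- def tseitinOnCnf(cnf, current):
--     activators = []
--     acts = []
--     res = []
--     for cl in cnf:
--         tscl, current = tseitinClause(cl, current)
--         activators.append(current)
--         res += tscl
--     current += 1
--     for a in activators:
--         res.append([a,-current])
--     res.append([current] + [-1 * a for a in activators])
--     return res, current
-- ===== SOURCE B (Python) =====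
-- def tseitinOnCnf(cnf, current):
--     final = current + len(cnf) + 1
--
--     def go(rest, act):
--         # recursion on the clause list: returns (blocks, links, negacts)
--         if not rest:
--             return [], [], []
--         cl = rest[0]
--         blocks, links, negacts = go(rest[1:], act + 1)
--         return ([[act, -l] for l in cl] + [[-act] + cl] + blocks,
--                 [[act, -final]] + links,
--                 [-act] + negacts)
--
--     blocks, links, negacts = go(cnf, current + 1)
--     return blocks + links + [[final] + negacts], final
-- ===== Notes on version B (the rewrite author's own statement) =====
-- stated objective: alternative
-- what changed: Replaces the tseitinClause helper, the threaded mutable counter and the second loop over activators with a structural recursion over the clause list that computes the final variable up front and builds the block clauses, activator-link clauses and negated-activator tail in one recursive descent by prepending.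
import Mathlib
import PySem

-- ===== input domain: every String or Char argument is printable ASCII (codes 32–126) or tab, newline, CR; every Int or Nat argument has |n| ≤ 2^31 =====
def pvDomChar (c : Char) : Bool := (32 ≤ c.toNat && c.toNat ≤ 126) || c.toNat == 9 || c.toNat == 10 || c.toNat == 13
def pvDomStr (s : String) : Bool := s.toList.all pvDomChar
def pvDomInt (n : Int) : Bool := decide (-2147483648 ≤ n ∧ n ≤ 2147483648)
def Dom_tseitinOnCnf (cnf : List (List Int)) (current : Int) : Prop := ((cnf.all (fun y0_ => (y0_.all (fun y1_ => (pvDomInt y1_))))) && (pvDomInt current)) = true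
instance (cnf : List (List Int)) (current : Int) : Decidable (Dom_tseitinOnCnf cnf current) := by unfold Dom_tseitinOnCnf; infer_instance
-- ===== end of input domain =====

-- B drops the tseitinClause helper and threaded counter: a single structural recursion builds blocks, activator links and the negated-activator tail at once; same return value.
-- ===== PORT A =====
def tseitinClause (clause : List Int) (current : Int) : List (List Int) × Int :=
  let current := current + 1
  let res := clause.foldl (fun res l => res ++ [[current, -l]]) []
  (res ++ [(-current) :: clause.map (fun l => l)], current)

def tseitinOnCnf (cnf : List (List Int)) (current : Int) : List (List Int) × Int :=
  let s := cnf.foldl (fun (s : List Int × List (List Int) × Int) cl =>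
      let tc := tseitinClause cl s.2.2
      (s.1 ++ [tc.2], s.2.1 ++ tc.1, tc.2)) ([], [], current)
  let activators := s.1
  let current := s.2.2 + 1
  let res := activators.foldl (fun res a => res ++ [[a, -current]]) s.2.1
  (res ++ [current :: activators.map (fun a => -1 * a)], current)

-- ===== PORT B =====
def goB (final : Int) : List (List Int) → Int → List (List Int) × List (List Int) × List Int
  | [], _ => ([], [], [])
  | cl :: rest, act =>
    let r := goB final rest (act + 1)
    (cl.map (fun l => [act, -l]) ++ [(-act) :: cl] ++ r.1,
     [act, -final] :: r.2.1,
     (-act) :: r.2.2)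

def tseitinOnCnf_alt (cnf : List (List Int)) (current : Int) : List (List Int) × Int :=
  let final := current + cnf.length + 1
  let r := goB final cnf (current + 1)
  (r.1 ++ r.2.1 ++ [final :: r.2.2], final)

-- ===== PRECONDITION & SPEC =====
def Spec_tseitinOnCnf (cnf : List (List Int)) (current : Int) (out : List (List Int) × Int) : Prop := out = tseitinOnCnf_alt cnf current
instance (cnf : List (List Int)) (current : Int) (out : List (List Int) × Int) : Decidable (Spec_tseitinOnCnf cnf current out) := by unfold Spec_tseitinOnCnf; infer_instance

-- ===== CLAIM (what is proved, stated in full; the proofs are below) =====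
def Claim_equal_tseitinOnCnf : Prop := ∀ (cnf : List (List Int)) (current : Int), Dom_tseitinOnCnf cnf current → Spec_tseitinOnCnf cnf current (tseitinOnCnf cnf current)

-- ===== LEMMAS AND PROOFS =====
theorem foldl_snoc {α β : Type} (f : α → β) : ∀ (cl : List α) (acc : List β),
    cl.foldl (fun r l => r ++ [f l]) acc = acc ++ cl.map f := by
  intro cl
  induction cl with
  | nil => simp
  | cons x xs ih => intro acc; simp [List.foldl, ih]

-- proof-only helpers: closed forms of A's threaded fold
def blockOf (c : Int) (cl : List Int) : List (List Int) := cl.map (fun l => [c, -l]) ++ [(-c) :: cl]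

def actsFrom : Int → List (List Int) → List Int
  | _, [] => []
  | cur, _ :: r => (cur + 1) :: actsFrom (cur + 1) r

def blocksFrom : Int → List (List Int) → List (List Int)
  | _, [] => []
  | cur, cl :: r => blockOf (cur + 1) cl ++ blocksFrom (cur + 1) r

theorem tseitinClause_eq (cl : List Int) (cur : Int) :
    tseitinClause cl cur = (blockOf (cur + 1) cl, cur + 1) := by
  show (cl.foldl (fun res l => res ++ [[cur + 1, -l]]) [] ++ [(-(cur + 1)) :: cl.map (fun l => l)], cur + 1) = _
  rw [foldl_snoc (fun l => [cur + 1, -l]) cl []]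
  simp [blockOf]

theorem foldA_aux : ∀ (cnf : List (List Int)) (acts : List Int) (res : List (List Int)) (cur : Int),
    cnf.foldl (fun (s : List Int × List (List Int) × Int) cl =>
        (s.1 ++ [s.2.2 + 1], s.2.1 ++ blockOf (s.2.2 + 1) cl, s.2.2 + 1)) (acts, res, cur)
      = (acts ++ actsFrom cur cnf, res ++ blocksFrom cur cnf, cur + cnf.length) := by
  intro cnf
  induction cnf with
  | nil => intro acts res cur; simp [actsFrom, blocksFrom]
  | cons cl r ih =>
    intro acts res cur
    rw [List.foldl_cons]
    show List.foldl _ (acts ++ [cur + 1], res ++ blockOf (cur + 1) cl, cur + 1) r = _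
    rw [ih]
    simp only [actsFrom, blocksFrom, List.length_cons, Prod.mk.injEq]
    refine ⟨by simp, by simp, by push_cast; ring⟩

theorem foldA_eq (cnf : List (List Int)) (acts : List Int) (res : List (List Int)) (cur : Int) :
    cnf.foldl (fun (s : List Int × List (List Int) × Int) cl =>
        let tc := tseitinClause cl s.2.2
        (s.1 ++ [tc.2], s.2.1 ++ tc.1, tc.2)) (acts, res, cur)
      = (acts ++ actsFrom cur cnf, res ++ blocksFrom cur cnf, cur + cnf.length) := by
  have hfun : (fun (s : List Int × List (List Int) × Int) cl =>
        let tc := tseitinClause cl s.2.2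
        (s.1 ++ [tc.2], s.2.1 ++ tc.1, tc.2))
      = (fun (s : List Int × List (List Int) × Int) cl =>
        (s.1 ++ [s.2.2 + 1], s.2.1 ++ blockOf (s.2.2 + 1) cl, s.2.2 + 1)) := by
    funext s cl; simp [tseitinClause_eq]
  rw [hfun, foldA_aux]

theorem goB_eq (final : Int) : ∀ (cnf : List (List Int)) (cur : Int),
    goB final cnf (cur + 1)
      = (blocksFrom cur cnf,
         (actsFrom cur cnf).map (fun a => [a, -final]),
         (actsFrom cur cnf).map (fun a => -a)) := by
  intro cnf
  induction cnf with
  | nil => intro cur; simp [goB, actsFrom, blocksFrom]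
  | cons cl r ih =>
    intro cur
    show goB final (cl :: r) (cur + 1) = _
    simp only [goB, ih (cur + 1), actsFrom, blocksFrom, blockOf, List.map_cons]

-- ===== VERDICT (by name: the statement is the Claim_ definition above) =====
theorem tseitinOnCnf_spec : Claim_equal_tseitinOnCnf := by
  intro cnf current _
  show tseitinOnCnf cnf current = tseitinOnCnf_alt cnf current
  simp only [tseitinOnCnf, tseitinOnCnf_alt, foldA_eq, foldl_snoc, List.nil_append, goB_eq]
  refine Prod.ext ?_ rfl
  have h2 : (actsFrom current cnf).map (fun a => -1 * a)
      = (actsFrom current cnf).map (fun a => -a) :=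
    List.map_congr_left (fun a _ => by ring)
  rw [h2]
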